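-- pv_equiv track=rewrite | github.com/growgraph/GraFlo | graphcast/util/merge.py | discriminate_by_key
-- ===== SOURCE A (Python) =====
-- def discriminate_by_key(items, indexes, discriminant_key, fast=False):
--     """Filter documents based on index fields and key presence.
--
--     This function filters a list of documents based on the presence of index fields
--     and a specific key. It can operate in fast mode to return after finding the
--     first match.
--
--     Args:
--         items: List of documents (dictionaries) to filter
--         indexes: List of index field names to check for presence
--         discriminant_key: Key to check for presence
--         fast: Whether to return after first match (default: False)
--
--     Returns:
--         list[dict]: Filtered list of documents
--     """
--     # pick items that have any of index field present
--     _items = [item for item in items if any(k in item for k in indexes)]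
--
--     if discriminant_key is not None:
--         result = []
--         for item in _items:
--             if discriminant_key in item:
--                 result += [item]
--                 if fast:
--                     break
--         return result
--     return _items
-- ===== SOURCE B (Python) =====
-- def discriminate_by_key(items, indexes, discriminant_key, fast=False):
--     """Declarative re-implementation: one combined-predicate filter over items,
--     with the early break replaced by slicing the match list; the index test
--     scans each item's keys against a set of indexes (direction flipped)."""
--     index_set = set(indexes)
--     if discriminant_key is None:
--         pred = lambda item: not index_set.isdisjoint(item)
--     else:
--         pred = lambda item: not index_set.isdisjoint(item) and discriminant_key in item
--     matched = list(filter(pred, items))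
--     if fast and discriminant_key is not None:
--         return matched[:1]
--     return matched
-- ===== Notes on version B (the rewrite author's own statement) =====
-- stated objective: idiomatic
-- what changed: Replaces A's staged passes (intermediate index-filtered list, then an accumulate-and-break loop) by a single filter with one combined predicate plus a [:1] slice for fast mode, and flips the index test to scan each item's keys against a set built from indexes.
import Mathlib
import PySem

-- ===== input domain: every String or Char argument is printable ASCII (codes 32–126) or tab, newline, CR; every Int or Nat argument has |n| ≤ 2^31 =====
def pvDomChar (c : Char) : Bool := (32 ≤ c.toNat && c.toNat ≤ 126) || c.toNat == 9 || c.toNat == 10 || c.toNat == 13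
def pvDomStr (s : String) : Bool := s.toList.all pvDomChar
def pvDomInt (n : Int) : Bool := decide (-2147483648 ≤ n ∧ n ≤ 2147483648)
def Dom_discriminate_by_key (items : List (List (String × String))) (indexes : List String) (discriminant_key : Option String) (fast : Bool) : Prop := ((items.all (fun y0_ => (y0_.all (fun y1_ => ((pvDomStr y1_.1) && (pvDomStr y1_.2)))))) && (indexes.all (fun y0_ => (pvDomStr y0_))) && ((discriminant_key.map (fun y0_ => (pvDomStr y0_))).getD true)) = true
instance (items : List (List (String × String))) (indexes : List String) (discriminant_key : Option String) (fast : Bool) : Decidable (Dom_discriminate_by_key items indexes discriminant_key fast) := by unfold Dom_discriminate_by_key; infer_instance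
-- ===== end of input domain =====

-- B replaces A's staged passes (index filter, then accumulate-and-break) by one combined-predicate filter plus take-1 for fast mode, with the index test flipped to scan each item's keys against a set of indexes; objective: idiomatic.


-- ===== PORT A =====
-- 'k in item' on a dict = key membership in the association list
def pvHasKey (item : List (String × String)) (k : String) : Bool :=
  item.any (fun p => p.1 == k)

-- A's second loop: accumulate matches, break after the first when fast
def pvLoopA (key : String) (fast : Bool) : List (List (String × String)) → List (List (String × String)) → List (List (String × String))
  | acc, [] => acc
  | acc, item :: rest =>
    if pvHasKey item key then
      if fast then acc ++ [item]
      else pvLoopA key fast (acc ++ [item]) rest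
    else pvLoopA key fast acc rest

def discriminate_by_key (items : List (List (String × String))) (indexes : List String) (discriminant_key : Option String) (fast : Bool) : List (List (String × String)) :=
  let _items := items.filter (fun item => indexes.any (fun k => pvHasKey item k))
  match discriminant_key with
  | some key => pvLoopA key fast [] _items
  | none => _items

-- ===== PORT B =====
-- 'not index_set.isdisjoint(item)': iterating a dict yields its keys
def pvIndexHit (indexSet : PySem.Set String) (item : List (String × String)) : Bool :=
  !(PySem.Set.isdisjoint indexSet (item.map Prod.fst))

def discriminate_by_key_alt (items : List (List (String × String))) (indexes : List String) (discriminant_key : Option String) (fast : Bool) : List (List (String × String)) :=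
  let indexSet := PySem.Set.ofList indexes
  let pred : List (String × String) → Bool :=
    match discriminant_key with
    | none => fun item => pvIndexHit indexSet item
    | some key => fun item => pvIndexHit indexSet item && pvHasKey item key
  let matched := items.filter pred
  if fast && discriminant_key.isSome then matched.take 1 else matched

-- ===== PRECONDITION & SPEC =====
def Spec_discriminate_by_key (items : List (List (String × String))) (indexes : List String) (discriminant_key : Option String) (fast : Bool) (out : List (List (String × String))) : Prop := out = discriminate_by_key_alt items indexes discriminant_key fast
instance (items : List (List (String × String))) (indexes : List String) (discriminant_key : Option String) (fast : Bool) (out : List (List (String × String))) : Decidable (Spec_discriminate_by_key items indexes discriminant_key fast out) := by unfold Spec_discriminate_by_key; infer_instance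

-- ===== CLAIM =====
def Claim_equal_discriminate_by_key : Prop := ∀ (items : List (List (String × String))) (indexes : List String) (discriminant_key : Option String) (fast : Bool), Dom_discriminate_by_key items indexes discriminant_key fast → Spec_discriminate_by_key items indexes discriminant_key fast (discriminate_by_key items indexes discriminant_key fast)

-- ===== LEMMAS AND PROOFS =====

-- membership direction flip: scan item's keys against set(indexes) = scan indexes against item
theorem pvIndexHit_eq (indexes : List String) (item : List (String × String)) :
    pvIndexHit (PySem.Set.ofList indexes) item = indexes.any (fun k => pvHasKey item k) := by
  rw [Bool.eq_iff_iff]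
  simp only [pvIndexHit, PySem.Set.isdisjoint, Bool.not_not, List.any_eq_true, pvHasKey]
  constructor
  · rintro ⟨x, hx, hc⟩
    have hx' := (PySem.Set.mem_ofList indexes x).1 hx
    have hmem : x ∈ item.map Prod.fst := (PySem.Set.contains_iff _ _).1 hc
    rcases List.mem_map.1 hmem with ⟨p, hp, rfl⟩
    exact ⟨p.1, hx', p, hp, by simp⟩
  · rintro ⟨k, hk, p, hp, hpk⟩
    refine ⟨k, (PySem.Set.mem_ofList indexes k).2 hk, (PySem.Set.contains_iff _ _).2 ?_⟩
    exact List.mem_map.2 ⟨p, hp, by simpa [beq_iff_eq] using hpk⟩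

theorem pvLoopA_acc (key : String) (fast : Bool) (acc : List (List (String × String))) (l : List (List (String × String))) :
    pvLoopA key fast acc l = acc ++ pvLoopA key fast [] l := by
  induction l generalizing acc with
  | nil => simp [pvLoopA]
  | cons item rest ih =>
    by_cases h : pvHasKey item key
    · by_cases hf : fast
      · simp [pvLoopA, h, hf]
      · rw [pvLoopA, pvLoopA, if_pos h, if_pos h, if_neg hf, if_neg hf,
          ih (acc ++ [item]), ih ([] ++ [item])]
        simp
    · rw [pvLoopA, pvLoopA, if_neg h, if_neg h, ih acc]

theorem pvLoopA_slow (key : String) (l : List (List (String × String))) :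
    pvLoopA key false [] l = l.filter (fun item => pvHasKey item key) := by
  induction l with
  | nil => simp [pvLoopA]
  | cons item rest ih =>
    rw [pvLoopA, List.filter_cons]
    by_cases h : pvHasKey item key
    · rw [if_pos h, if_neg (by simp), pvLoopA_acc]
      simp [h, ih]
    · simp [h, ih]

theorem pvLoopA_fast (key : String) (l : List (List (String × String))) :
    pvLoopA key true [] l = (l.filter (fun item => pvHasKey item key)).take 1 := by
  induction l with
  | nil => simp [pvLoopA]
  | cons item rest ih =>
    rw [pvLoopA, List.filter_cons]
    by_cases h : pvHasKey item key
    · simp [h]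
    · simp [h, ih]

-- ===== VERDICT =====
theorem discriminate_by_key_spec : Claim_equal_discriminate_by_key := by
  intro items indexes dk fast _
  unfold Spec_discriminate_by_key discriminate_by_key discriminate_by_key_alt
  cases dk with
  | none =>
    dsimp only
    rw [show (fast && (none : Option String).isSome) = false by simp]
    simp only [Bool.false_eq_true, if_false]
    exact (List.filter_congr (fun item _ => (pvIndexHit_eq indexes item).symm))
  | some key =>
    dsimp only
    rw [show (fast && (some key : Option String).isSome) = fast by simp]
    have hsplit : items.filter (fun item => pvIndexHit (PySem.Set.ofList indexes) item && pvHasKey item key)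
        = (items.filter (fun item => indexes.any (fun k => pvHasKey item k))).filter (fun item => pvHasKey item key) := by
      rw [List.filter_filter]
      exact List.filter_congr (fun item _ => by rw [pvIndexHit_eq, Bool.and_comm])
    cases fast with
    | false =>
      simp only [Bool.false_eq_true, if_false]
      rw [pvLoopA_slow, hsplit]
    | true =>
      simp only [if_true]
      rw [pvLoopA_fast, hsplit]
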